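-- pv_equiv track=rewrite | github.com/abnv22107/FinanceAgent | main.py | _extract_10k_sections
-- ===== SOURCE A (Python) =====
-- def _extract_10k_sections(text: str) -> str:
--     """Extract key sections from 10-K filing"""
--     sections_to_find = [
--         "ITEM 1. BUSINESS",
--         "ITEM 1A. RISK FACTORS",
--         "ITEM 2. PROPERTIES",
--         "ITEM 3. LEGAL PROCEEDINGS",
--         "ITEM 7. MANAGEMENT'S DISCUSSION"
--     ]
--
--     extracted_sections = []
--     text_upper = text.upper()
--
--     for section in sections_to_find:
--         start_idx = text_upper.find(section)
--         if start_idx != -1: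
--             # Find next section or end
--             end_idx = len(text)
--             for other_section in sections_to_find:
--                 if other_section != section:
--                     other_idx = text_upper.find(other_section, start_idx + len(section))
--                     if other_idx != -1 and other_idx < end_idx:
--                         end_idx = other_idx
--
--             section_text = text[start_idx:start_idx + min(3000, end_idx - start_idx)]
--             extracted_sections.append(f"{section}:\n{section_text}")
--
--     return "\n\n".join(extracted_sections) if extracted_sections else text[:10000]
-- ===== SOURCE B (Python) =====
-- def _extract_10k_sections(text: str) -> str:
--     """Extract key sections from 10-K filing (occurrence-table rewrite)"""
--     sections_to_find = [
--         "ITEM 1. BUSINESS",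
--         "ITEM 1A. RISK FACTORS",
--         "ITEM 2. PROPERTIES",
--         "ITEM 3. LEGAL PROCEEDINGS",
--         "ITEM 7. MANAGEMENT'S DISCUSSION",
--     ]
--
--     text_upper = text.upper()
--     # One table of every occurrence position of every header, built up front.
--     occ = {}
--     for section in sections_to_find:
--         positions = []
--         p = text_upper.find(section)
--         while p != -1:
--             positions.append(p)
--             p = text_upper.find(section, p + 1)
--         occ[section] = positions
--
--     parts = []
--     for section in sections_to_find:
--         if occ[section]:
--             start = occ[section][0]
--             bound = start + len(section)
--             end = min(
--                 (p for other in sections_to_find if other != section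
--                    for p in occ[other] if p >= bound),
--                 default=len(text),
--             )
--             parts.append(f"{section}:\n{text[start:start + min(3000, end - start)]}")
--
--     return "\n\n".join(parts) if parts else text[:10000]
-- ===== Notes on version B (the rewrite author's own statement) =====
-- stated objective: alternative
-- what changed: Instead of re-running find for every other header after each hit, B builds one table of all occurrence positions of every header up front and computes each section's end as the min table position past the section start.
import Mathlib
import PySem

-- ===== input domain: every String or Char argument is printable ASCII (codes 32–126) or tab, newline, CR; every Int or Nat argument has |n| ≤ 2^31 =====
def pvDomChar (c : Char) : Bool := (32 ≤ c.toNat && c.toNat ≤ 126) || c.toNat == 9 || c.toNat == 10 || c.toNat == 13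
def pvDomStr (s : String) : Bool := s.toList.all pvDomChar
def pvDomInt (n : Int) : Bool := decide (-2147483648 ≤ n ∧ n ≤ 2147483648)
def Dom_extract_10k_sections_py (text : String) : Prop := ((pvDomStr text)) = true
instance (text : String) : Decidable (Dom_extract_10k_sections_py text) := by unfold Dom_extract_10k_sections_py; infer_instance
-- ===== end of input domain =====

-- B replaces A's per-section rescans (a find of every other header after each hit) by one
-- occurrence table of ALL positions of every header built up front, then reads starts and
-- ends off that table (objective: alternative decomposition, identical output).

-- the five section headers (shared constant of both Pythons)
def pvSecs : List (List Char) :=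
  ["ITEM 1. BUSINESS".toList,
   "ITEM 1A. RISK FACTORS".toList,
   "ITEM 2. PROPERTIES".toList,
   "ITEM 3. LEGAL PROCEEDINGS".toList,
   "ITEM 7. MANAGEMENT'S DISCUSSION".toList]

-- ===== PORT A =====
-- inner loop computing end_idx by scanning the other sections with find-from
def pvEndA (cs tu sec : List Char) (start : Int) : Int :=
  pvSecs.foldl (fun e other =>
    if other ≠ sec then
      let oi := PySem.Chars.findFrom tu other (start + (sec.length : Int))
      if oi ≠ -1 ∧ oi < e then oi else e
    else e) ((cs.length : Int))

def pvCoreA (cs : List Char) : List (List Char) :=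
  let tu := PySem.Chars.upper cs
  pvSecs.foldl (fun acc sec =>
    let start := PySem.Chars.find tu sec
    if start ≠ -1 then
      let e := pvEndA cs tu sec start
      acc ++ [sec ++ ':' :: '\n' :: PySem.Chars.slice cs (some start) (some (start + min 3000 (e - start)))]
    else acc) []

def extract_10k_sections_py (text : String) : String :=
  let ex := pvCoreA text.toList
  if ex ≠ [] then String.ofList (PySem.Chars.join ('\n' :: '\n' :: []) ex)
  else String.ofList (PySem.Chars.slice text.toList none (some 10000))

-- ===== PORT B =====
-- the while-loop collecting every occurrence position of sec from index k on (fuel makes it total)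
def pvCollect (tu sec : List Char) : Nat → Nat → List Int
  | 0, _ => []
  | fuel+1, k =>
    let q := PySem.Chars.findFrom tu sec (k : Int)
    if q = -1 then [] else q :: pvCollect tu sec fuel (q.toNat + 1)

-- occurrence table: header ↦ all its positions in the uppercased text, built once up front
def pvOccTable (tu : List Char) : PySem.Dict (List Char) (List Int) :=
  pvSecs.foldl (fun d sec => d.insert sec (pvCollect tu sec (tu.length + 1) 0)) PySem.Dict.empty

def pvCoreB (cs : List Char) : List (List Char) :=
  let tu := PySem.Chars.upper cs
  let occ := pvOccTable tu
  pvSecs.foldl (fun acc sec =>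
    match occ.getD sec [] with
    | [] => acc
    | start :: _ =>
      let bound := start + (sec.length : Int)
      let e := ((pvSecs.filter (fun o => o ≠ sec)).flatMap
                  (fun o => (occ.getD o []).filter (fun p => bound ≤ p))).foldl min ((cs.length : Int))
      acc ++ [sec ++ ':' :: '\n' :: PySem.Chars.slice cs (some start) (some (start + min 3000 (e - start)))]) []

def extract_10k_sections_py_alt (text : String) : String :=
  let parts := pvCoreB text.toList
  if parts ≠ [] then String.ofList (PySem.Chars.join ('\n' :: '\n' :: []) parts)
  else String.ofList (PySem.Chars.slice text.toList none (some 10000))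

-- ===== PRECONDITION & SPEC =====
def Spec_extract_10k_sections_py (text : String) (out : String) : Prop := out = extract_10k_sections_py_alt text
instance (text : String) (out : String) : Decidable (Spec_extract_10k_sections_py text out) := by unfold Spec_extract_10k_sections_py; infer_instance

-- ===== CLAIM (what is proved, stated in full; the proofs are below) =====
def Claim_equal_extract_10k_sections_py : Prop := ∀ (text : String), Dom_extract_10k_sections_py text → Spec_extract_10k_sections_py text (extract_10k_sections_py text)

-- ===== LEMMAS AND PROOFS =====
theorem pvFindFrom_le (tu sec : List Char) (k : Nat) (hk : k ≤ tu.length) :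
    PySem.Chars.findFrom tu sec (k : Int) ≤ (tu.length : Int) := by
  rw [PySem.Chars.findFrom_natCast tu sec k hk]
  split
  · omega
  · have h := PySem.Chars.find_le_length (tu.drop k) sec
    simp only [List.length_drop] at h
    omega

theorem pvCollect_sound (tu sec : List Char) (hsec : sec ≠ []) :
    ∀ (fuel k : Nat), k ≤ tu.length → ∀ p ∈ pvCollect tu sec fuel k,
      (k : Int) ≤ p ∧ 0 ≤ p ∧ sec <+: tu.drop p.toNat ∧ p.toNat + sec.length ≤ tu.length := by
  intro fuel
  induction fuel with
  | zero => intro k _ p hp; simp [pvCollect] at hp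
  | succ fuel ih =>
    intro k hk p hp
    simp only [pvCollect] at hp
    by_cases hq : PySem.Chars.findFrom tu sec (k : Int) = -1
    · simp [hq] at hp
    · simp only [if_neg hq] at hp
      obtain ⟨hkq, hpre, hmin⟩ := PySem.Chars.findFrom_natCast_spec tu sec k hk hq
      have hqle := pvFindFrom_le tu sec k hk
      set q := PySem.Chars.findFrom tu sec (k : Int) with hqdef
      have hq0 : 0 ≤ q := le_trans (by exact_mod_cast Nat.zero_le k) hkq
      have hsl : 1 ≤ sec.length := by
        cases sec with | nil => exact absurd rfl hsec | cons a l => simp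
      have h5 := hpre.length_le
      simp only [List.length_drop] at h5
      have hlen : q.toNat + sec.length ≤ tu.length := by omega
      rcases List.mem_cons.1 hp with rfl | hp'
      · exact ⟨hkq, hq0, hpre, hlen⟩
      · have hk' : q.toNat + 1 ≤ tu.length := by omega
        obtain ⟨h1, h2, h3, h4⟩ := ih (q.toNat + 1) hk' p hp'
        refine ⟨?_, h2, h3, h4⟩
        have : (k : Int) ≤ ((q.toNat + 1 : Nat) : Int) := by push_cast; omega
        exact le_trans this h1

theorem pvInfix_of_match {tu sec : List Char} {j m : Nat} (hm : m ≤ j)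
    (h : sec <+: tu.drop j) : sec <:+: tu.drop m := by
  refine List.infix_iff_prefix_suffix.2 ⟨tu.drop j, h, ?_⟩
  have hdd : tu.drop j = (tu.drop m).drop (j - m) := by rw [List.drop_drop]; congr 1; omega
  rw [hdd]; exact List.drop_suffix _ _

theorem pvNoMatch_of_findFrom_eq {tu sec : List Char} {k : Nat} (hk : k ≤ tu.length)
    (h : PySem.Chars.findFrom tu sec (k : Int) = -1) :
    ∀ j, k ≤ j → ¬ sec <+: tu.drop j := by
  intro j hj hpre
  exact (PySem.Chars.findFrom_natCast_eq_neg_one_iff tu sec k hk).1 h (pvInfix_of_match hj hpre)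

theorem pvFindFrom_exists {tu sec : List Char} {m j : Nat} (hm : m ≤ tu.length) (hj : m ≤ j)
    (h : sec <+: tu.drop j) : PySem.Chars.findFrom tu sec (m : Int) ≠ -1 := by
  intro hc
  exact pvNoMatch_of_findFrom_eq hm hc j hj h

theorem pvCollect_filter_head (tu sec : List Char) (hsec : sec ≠ []) :
    ∀ (fuel k m : Nat), k ≤ tu.length → tu.length + 1 ≤ fuel + k → k ≤ m → m ≤ tu.length →
      ((pvCollect tu sec fuel k).filter (fun p => decide ((m : Int) ≤ p))).head? =
        (if PySem.Chars.findFrom tu sec (m : Int) = -1 then none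
         else some (PySem.Chars.findFrom tu sec (m : Int))) := by
  intro fuel
  induction fuel with
  | zero => intro k m hk hfuel _ _; omega
  | succ fuel ih =>
    intro k m hk hfuel hkm hm
    simp only [pvCollect]
    by_cases hq : PySem.Chars.findFrom tu sec (k : Int) = -1
    · rw [if_pos hq]
      have hnone : PySem.Chars.findFrom tu sec (m : Int) = -1 := by
        rw [PySem.Chars.findFrom_natCast_eq_neg_one_iff tu sec m hm]
        intro hinf
        obtain ⟨j, hj⟩ := (PySem.Chars.exists_prefix_drop_iff_isIn sec (tu.drop m)).2
          ((PySem.Chars.isIn_iff_infix sec (tu.drop m)).2 hinf)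
        rw [List.drop_drop] at hj
        exact pvNoMatch_of_findFrom_eq hk hq (m + j) (by omega) hj
      simp [hnone]
    · rw [if_neg hq]
      obtain ⟨hkq, hpre, hmin⟩ := PySem.Chars.findFrom_natCast_spec tu sec k hk hq
      have hqle := pvFindFrom_le tu sec k hk
      set q := PySem.Chars.findFrom tu sec (k : Int) with hqdef
      have hq0 : 0 ≤ q := le_trans (by exact_mod_cast Nat.zero_le k) hkq
      have hsl : 1 ≤ sec.length := by
        cases sec with | nil => exact absurd rfl hsec | cons a l => simp
      have h5 := hpre.length_le
      simp only [List.length_drop] at h5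
      by_cases hmq : (m : Int) ≤ q
      · -- the head q survives the filter and findFrom at m finds exactly q
        rw [List.filter_cons_of_pos (by simpa using hmq)]
        have hne : PySem.Chars.findFrom tu sec (m : Int) ≠ -1 :=
          pvFindFrom_exists hm (by omega) hpre
        obtain ⟨hmf, hfpre, hfmin⟩ := PySem.Chars.findFrom_natCast_spec tu sec m hm hne
        set f := PySem.Chars.findFrom tu sec (m : Int) with hfdef
        have hf0 : 0 ≤ f := le_trans (by exact_mod_cast Nat.zero_le m) hmf
        have hfq : f = q := by
          have h1 : ¬ q.toNat < f.toNat := fun hlt => hfmin q.toNat (by omega) hlt hpre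
          have h2 : ¬ f.toNat < q.toNat := fun hlt => hmin f.toNat (by omega) hlt hfpre
          omega
        simp only [hfq, List.head?_cons, if_neg hq]
      · -- q is filtered out; recurse from q.toNat + 1 ≤ m
        rw [List.filter_cons_of_neg (by simpa using hmq)]
        exact ih (q.toNat + 1) m (by omega) (by omega) (by omega) hm

theorem pvFoldlMin_const {l : List Int} {a : Int} (h : ∀ p ∈ l, a ≤ p) :
    l.foldl min a = a := by
  induction l with
  | nil => rfl
  | cons x xs ih =>
    have hx : a ≤ x := h x (List.mem_cons_self)
    simp only [List.foldl_cons, min_eq_left hx]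
    exact ih (fun p hp => h p (List.mem_cons_of_mem _ hp))

theorem pvMinStep (tu sec : List Char) (hsec : sec ≠ []) (m : Nat) (hm : m ≤ tu.length) (e : Int) :
    ((pvCollect tu sec (tu.length + 1) 0).filter (fun p => decide ((m : Int) ≤ p))).foldl min e =
      (if PySem.Chars.findFrom tu sec (m : Int) ≠ -1 ∧ PySem.Chars.findFrom tu sec (m : Int) < e
       then PySem.Chars.findFrom tu sec (m : Int) else e) := by
  have hhead := pvCollect_filter_head tu sec hsec (tu.length + 1) 0 m (Nat.zero_le _) (by omega)
    (Nat.zero_le _) hm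
  set L := (pvCollect tu sec (tu.length + 1) 0).filter (fun p => decide ((m : Int) ≤ p)) with hL
  by_cases hq : PySem.Chars.findFrom tu sec (m : Int) = -1
  · rw [if_pos hq] at hhead
    have : L = [] := List.head?_eq_none_iff.1 hhead
    rw [this]
    simp [hq]
  · rw [if_neg hq] at hhead
    set f := PySem.Chars.findFrom tu sec (m : Int) with hfdef
    obtain ⟨hmf, hfpre, hfmin⟩ := PySem.Chars.findFrom_natCast_spec tu sec m hm hq
    have hf0 : 0 ≤ f := le_trans (by exact_mod_cast Nat.zero_le m) hmf
    -- every element of L is ≥ f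
    have hall : ∀ p ∈ L, f ≤ p := by
      intro p hp
      rw [hL, List.mem_filter] at hp
      obtain ⟨hpc, hpm⟩ := hp
      have hpm' : (m : Int) ≤ p := by simpa using hpm
      obtain ⟨_, hp0, hppre, hplen⟩ :=
        pvCollect_sound tu sec hsec (tu.length + 1) 0 (Nat.zero_le _) p hpc
      by_contra hlt
      have hlt : p < f := by omega
      exact hfmin p.toNat (by omega) (by omega) hppre
    cases hLc : L with
    | nil => rw [hLc] at hhead; simp at hhead
    | cons a l =>
      rw [hLc] at hhead hall
      simp only [List.head?_cons, Option.some.injEq] at hhead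
      subst hhead
      simp only [List.foldl_cons]
      have : l.foldl min (min e f) = min e f := by
        refine pvFoldlMin_const (fun p hp => ?_)
        exact le_trans (min_le_right e f) (hall p (List.mem_cons_of_mem _ hp))
      rw [this]
      by_cases h : e ≤ f
      · rw [min_eq_left h, if_neg (by omega)]
      · rw [min_eq_right (by omega), if_pos ⟨hq, by omega⟩]

theorem pvOccTable_getD (tu : List Char) (sec : List Char) (hsec : sec ∈ pvSecs) :
    (pvOccTable tu).getD sec [] = pvCollect tu sec (tu.length + 1) 0 := by
  fin_cases hsec <;> rfl

theorem pvEnd_eq (cs : List Char) (sec : List Char) (f : Int)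
    (hf : PySem.Chars.find (PySem.Chars.upper cs) sec = f) (hne : f ≠ -1) :
    ((pvSecs.filter (fun o => o ≠ sec)).flatMap
        (fun o => ((pvOccTable (PySem.Chars.upper cs)).getD o []).filter
          (fun p => f + (sec.length : Int) ≤ p))).foldl min ((cs.length : Int)) =
    pvEndA cs (PySem.Chars.upper cs) sec f := by
  set tu := PySem.Chars.upper cs with htudef
  have htu : tu.length = cs.length := by simp [htudef, PySem.Chars.upper]
  have hf0 : 0 ≤ f := by
    have := PySem.Chars.neg_one_le_find tu sec
    rw [hf] at this
    omega
  obtain ⟨hpre, -⟩ := PySem.Chars.find_spec (s := tu) (sub := sec) (by rw [hf]; exact hf0)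
  rw [hf] at hpre
  have hm : f.toNat + sec.length ≤ tu.length := by
    have h5 := hpre.length_le
    simp only [List.length_drop] at h5
    have := PySem.Chars.find_le_length tu sec
    rw [hf] at this
    omega
  have hbound : f + (sec.length : Int) = ((f.toNat + sec.length : Nat) : Int) := by
    push_cast
    omega
  simp only [hbound]
  rw [List.foldl_flatMap, List.foldl_filter]
  unfold pvEndA
  apply PySem.List.foldl_congr_mem
  intro e o ho
  by_cases hos : o = sec
  · simp [hos]
  · rw [if_pos (by simpa using hos), if_pos hos]
    have hone : o ≠ [] := by fin_cases ho <;> decide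
    rw [pvOccTable_getD tu o ho, pvMinStep tu o hone (f.toNat + sec.length) hm e]
    simp only [hbound]

theorem pvCore_eq (cs : List Char) : pvCoreA cs = pvCoreB cs := by
  simp only [pvCoreA, pvCoreB]
  apply PySem.List.foldl_congr_mem
  intro acc sec hsec
  rw [pvOccTable_getD _ sec hsec]
  have h1 : pvCollect (PySem.Chars.upper cs) sec ((PySem.Chars.upper cs).length + 1) 0 =
      (if PySem.Chars.find (PySem.Chars.upper cs) sec = -1 then []
       else PySem.Chars.find (PySem.Chars.upper cs) sec ::
         pvCollect (PySem.Chars.upper cs) sec (PySem.Chars.upper cs).length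
           ((PySem.Chars.find (PySem.Chars.upper cs) sec).toNat + 1)) := by
    simp only [pvCollect, Nat.cast_zero, PySem.Chars.findFrom_zero]
  rw [h1]
  by_cases h : PySem.Chars.find (PySem.Chars.upper cs) sec = -1
  · rw [if_pos h, if_neg (by simpa using h)]
  · rw [if_neg h, if_pos h]
    simp only []
    rw [pvEnd_eq cs sec _ rfl h]

-- ===== VERDICT (by name: the statement is the Claim_ definition above) =====
theorem extract_10k_sections_py_spec : Claim_equal_extract_10k_sections_py := by
  intro text _
  unfold Spec_extract_10k_sections_py extract_10k_sections_py extract_10k_sections_py_alt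
  rw [pvCore_eq]
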